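-- pv_equiv track=rewrite | github.com/arkal/rankboost | rankboost.py | get_mutations
-- ===== SOURCE A (Python) =====
-- def get_ref_pos_alt_aa(aa_change):
--     """
--     Determine the reference AA(s), the position in the protein, and the alternate AA(s) for a given
--     mutation in the form A123B
--
--     :param aa_change: A String describing a mutation in protein space
--     :return: reference AA(s), position, Alternamte AA(s)
--     :rtype: tuple(str, int, str)
--     """
--     # We expect the mutation to be 3-parts, non-numeric, numeric, non-numeric or NA
--     expected_isdigit = False
--     parts = ['']
--     for char in aa_change:
--         if char.isdigit() is expected_isdigit:
--             parts[-1] += char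
--         else:
--             parts.append(char)
--             expected_isdigit = not expected_isdigit
--     parts[1] = int(parts[1])
--     if len(parts) == 2:
--         parts.append('')
--     return parts
--
-- def get_mutations(mutations):
--     """
--     Given the list of mutations in the form
--         <TRANSCRIPT_1>_X123Y#0.56,<TRANSCRIPT_2>_X456Y#0.91,etc  -> for SNVS
--
--         <5'TRANSCRIPT_1>-<3'TRANSCRIPT_1>_FUSION_Junction:X-Spanning:Y,\
--         <5'TRANSCRIPT_2>-<3'TRANSCRIPT_2>_FUSION_Junction:A-Spanning:B,etc  -> for FUSIONS
--
--     return it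
--     in the form X>Y or FUSION
--
--     :param str mutations: The mutations covered by the input IAR
--     :return: The mutations in the reduced form
--     :rtype: str
--
--     >>> get_mutations('ENST1231.1_S123K#0.56')
--     'S>K'
--     >>> get_mutations('ENST1231.1_S123K#0.56,ENST1211.1_S143K#0.56')
--     'S>K'
--     >>> get_mutations('ENST1231.1_S123K#0.56_K124S#0.56,ENST1211.1_S143K#0.56_K144S#0.56')
--     'S>K+K>S'
--     >>> get_mutations('ENST1231.1_S123K#0.56_K125S#0.56,ENST1211.1_S143K#0.56_K145S#0.56')
--     'S>K+X+K>S'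
--     >>> get_mutations('ENST1231.1_S123K#0.56_K126S#0.56,ENST1211.1_S143K#0.56_K146S#0.56')
--     'S>K+2X+K>S'
--     >>> get_mutations('ENST1231.1_S123K#0.56,ENST1211.1_S143K#0.56_K146S#0.56')
--     'S>K+2X+K>S'
--     >>> get_mutations('ENST1231.1-ENST4564.2_FUSION_Junction:5-Spanning:10')
--     'FUSION'
--     >>> get_mutations('ENST1231.1_S123K#0.56_K125S#0.56,ENST1211.1_S143K#0.56_K147S#0.56')
--     Traceback (most recent call last):
--     ...
--     AssertionError
--
--     """
--     muts = mutations.split(',')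
--     out_muts = []
--     for mutation in muts:
--         if 'FUSION' in mutation:
--             return 'FUSION'
--         mutation = mutation.split('_')[1:]
--         temp_mutation = []
--         prev_pos = 0
--         for mut in mutation:
--             ref, curr_pos, alt = get_ref_pos_alt_aa(mut.split('#')[0])
--             if temp_mutation:
--                 distance = (curr_pos - prev_pos - 1)
--                 append_string = ('' if distance == 0 else
--                                  'X+' if distance == 1 else
--                                  str(distance) + 'X+')
--                 temp_mutation.append('+%s' % append_string)
--             temp_mutation.append(ref + '>' + alt)
--             prev_pos = curr_pos
--         out_muts.append(''.join(temp_mutation))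
--     # In case of neoepitope collapse, there might be multiple versions of mutations due to
--     # mutations near splicing locations
--     # In such case, we have to check if all mutations are subsets of the longest
--     if len(set(out_muts)) > 1:
--         longest_fusion = max(out_muts, key=len)
--         assert (all(s in longest_fusion for s in out_muts))
--         # If all mutations are subsets, return the longest mutation
--         collapsed_mut = longest_fusion
--     else:
--         collapsed_mut = out_muts[0]
--     return collapsed_mut
-- ===== SOURCE B (Python) =====
-- def _parse(tok):
--     """Slice 'A123B' around its leading digit run: (tok[:i], int(tok[i:j]), tok[j:])."""
--     i = 0
--     while i < len(tok) and not tok[i].isdigit():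
--         i += 1
--     j = i
--     while j < len(tok) and tok[j].isdigit():
--         j += 1
--     return tok[:i], int(tok[i:j]), tok[j:]
--
--
-- def get_mutations(mutations):
--     out_muts = []
--     for record in mutations.split(','):
--         if 'FUSION' in record:
--             return 'FUSION'
--         triples = [_parse(tok.split('#')[0]) for tok in record.split('_')[1:]]
--         items = []
--         prev = None
--         for ref, pos, alt in triples:
--             if prev is not None:
--                 gap = pos - prev - 1
--                 if gap == 1:
--                     items.append('X')
--                 elif gap != 0:
--                     items.append('%dX' % gap)
--             items.append('%s>%s' % (ref, alt))
--             prev = pos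
--         out_muts.append('+'.join(items))
--     longest = max(out_muts, key=len)
--     assert all(s in longest for s in out_muts)
--     return longest
-- ===== Notes on version B (the rewrite author's own statement) =====
-- stated objective: alternative
-- what changed: B replaces A's flag-driven character scanner with two-pointer slicing around the digit run, assembles each record by joining an interleaved list of gap items and substitution items on a plus separator instead of concatenating embedded separator prefixes, and drops the set-size branch by unconditionally taking the longest output and asserting substring containment; Pre_ excludes exactly the inputs where A raises (malformed tokens before the first FUSION record, or a failed closing assert).
-- outside the precondition, e.g. on get_mutations('a_B1C2'): A raises ValueError, B returns 'B>C2'; on get_mutations('a_bc'): A raises IndexError, B raises ValueError; on get_mutations('a_A1B_C9D,a_E1F'): A raises AssertionError, B raises AssertionError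
import Mathlib
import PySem

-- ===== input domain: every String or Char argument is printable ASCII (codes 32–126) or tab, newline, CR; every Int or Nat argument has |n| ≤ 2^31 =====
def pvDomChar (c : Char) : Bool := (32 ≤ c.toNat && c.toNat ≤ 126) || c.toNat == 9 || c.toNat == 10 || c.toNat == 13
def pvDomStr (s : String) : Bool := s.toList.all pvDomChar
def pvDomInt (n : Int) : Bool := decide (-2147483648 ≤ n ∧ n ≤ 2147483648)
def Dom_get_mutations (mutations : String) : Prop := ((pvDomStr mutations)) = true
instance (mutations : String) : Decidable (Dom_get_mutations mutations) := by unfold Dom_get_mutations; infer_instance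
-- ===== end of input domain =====

-- B slices each token around its digit run with two pointers (instead of A's flag-driven scanner),
-- joins each record from an interleaved list of gap items and substitution items on a plus
-- separator (instead of concatenating embedded separator prefixes), and collapses with an
-- unconditional max+assert (no set-size branch); same return value wherever A returns
-- (objective: alternative).

-- shared Python-primitive shims (s.split(sep) with a non-empty literal sep; xs[0] of a split result)
def pvSplit (s sep : List Char) : List (List Char) := (PySem.Chars.split? s sep).getD []
def pvFirst (l : List (List Char)) : List Char := l.headD []

-- ===== PORT A =====
-- the char loop of get_ref_pos_alt_aa: state = (parts reversed, expected_isdigit)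
def aaFoldStep (st : List (List Char) × Bool) (c : Char) : List (List Char) × Bool :=
  if PySem.Chars.isdigit c == st.2 then
    match st.1 with
    | p :: ps => ((p ++ [c]) :: ps, st.2)
    | [] => ([[c]], st.2)
  else ([c] :: st.1, !st.2)

-- none = the IndexError/ValueError of parts[1]=int(parts[1]) / the 3-way unpack
def get_ref_pos_alt_aa (cs : List Char) : Option (List Char × Int × List Char) :=
  match ((cs.foldl aaFoldStep ([[]], false)).1).reverse with
  | [p0, p1] => (PySem.Int.ofChars? p1).map (fun n => (p0, n, ([] : List Char)))
  | [p0, p1, p2] => (PySem.Int.ofChars? p1).map (fun n => (p0, n, p2))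
  | _ => none

-- '+%s' % append_string
def sepA (prev_pos curr_pos : Int) : List Char :=
  let d := curr_pos - prev_pos - 1
  ['+'] ++ (if d = 0 then [] else if d = 1 then ['X', '+']
            else PySem.Int.toChars d ++ ['X', '+'])

-- the inner 'for mut in mutation' loop: state = (temp_mutation, prev_pos)
def innerA : List (List Char) → List (List Char) → Int → Option (List (List Char))
  | [], temp, _ => some temp
  | mu :: rest, temp, prev_pos =>
    match get_ref_pos_alt_aa (pvFirst (pvSplit mu ['#'])) with
    | none => none
    | some (ref, curr_pos, alt) =>
      let temp' := if temp.isEmpty then temp else temp ++ [sepA prev_pos curr_pos]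
      innerA rest (temp' ++ [ref ++ ['>'] ++ alt]) curr_pos

-- the closing len(set)/max/assert block; none = AssertionError
def collapseA (out_muts : List (List Char)) : Option (List Char) :=
  if 1 < (PySem.Set.ofList out_muts).length then
    let longest := (PySem.List.max? out_muts (fun s => s.length)).getD []
    if out_muts.all (fun s => PySem.Chars.isIn s longest) then some longest else none
  else some (out_muts.headD [])

-- the outer 'for mutation in muts' loop with the FUSION early return
def outerA : List (List Char) → List (List Char) → Option (List Char)
  | [], out_muts => collapseA out_muts
  | m :: rest, out_muts =>
    if PySem.Chars.isIn "FUSION".toList m then some "FUSION".toList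
    else match innerA ((pvSplit m ['_']).drop 1) [] 0 with
      | none => none
      | some temp => outerA rest (out_muts ++ [PySem.Chars.join [] temp])

def get_mutations (mutations : String) : String :=
  match outerA (pvSplit mutations.toList [',']) [] with
  | some cs => String.ofList cs
  | none => ""   -- Python raises here; excluded by Pre_get_mutations

-- ===== PORT B =====
-- first while loop of _parse: advance i over non-digits, yielding (tok[:i], tok[i:])
def scanRef : List Char → List Char × List Char
  | [] => ([], [])
  | c :: cs =>
    if PySem.Chars.isdigit c then ([], c :: cs)
    else ((scanRef cs).1.cons c, (scanRef cs).2)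

-- second while loop of _parse: advance j over digits, yielding (tok[i:j], tok[j:])
def scanPos : List Char → List Char × List Char
  | [] => ([], [])
  | c :: cs =>
    if PySem.Chars.isdigit c then ((scanPos cs).1.cons c, (scanPos cs).2)
    else ([], c :: cs)

-- _parse: (tok[:i], int(tok[i:j]), tok[j:]); none = the ValueError of int('')
def parseTok (cs : List Char) : Option (List Char × Int × List Char) :=
  (PySem.Int.ofChars? (scanPos (scanRef cs).2).1).map
    (fun n => ((scanRef cs).1, n, (scanPos (scanRef cs).2).2))

-- the [_parse(tok.split('#')[0]) for tok in …] comprehension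
def parseAllB : List (List Char) → Option (List (List Char × Int × List Char))
  | [] => some []
  | tok :: rest =>
    match parseTok (pvFirst (pvSplit tok ['#'])) with
    | none => none
    | some t => (parseAllB rest).map (t :: ·)

-- the item-building loop: state = (items, prev); gap items interleaved with 'ref>alt' items
def stepB (st : List (List Char) × Option Int) (t : List Char × Int × List Char) :
    List (List Char) × Option Int :=
  let items :=
    match st.2 with
    | none => st.1
    | some prev =>
      let gap := t.2.1 - prev - 1
      if gap = 1 then st.1 ++ [['X']]
      else if gap ≠ 0 then st.1 ++ [PySem.Int.toChars gap ++ ['X']]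
      else st.1
  (items ++ [t.1 ++ ['>'] ++ t.2.2], some t.2.1)

def recordB (m : List Char) : Option (List Char) :=
  (parseAllB ((pvSplit m ['_']).drop 1)).map
    (fun ts => PySem.Chars.join ['+'] (ts.foldl stepB ([], none)).1)

-- unconditional max(out_muts, key=len) + assert; none = AssertionError
def finishB (out_muts : List (List Char)) : Option (List Char) :=
  let longest := (PySem.List.max? out_muts (fun s => s.length)).getD []
  if out_muts.all (fun s => PySem.Chars.isIn s longest) then some longest else none

def outerB : List (List Char) → List (List Char) → Option (List Char)
  | [], out_muts => finishB out_muts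
  | m :: rest, out_muts =>
    if PySem.Chars.isIn "FUSION".toList m then some "FUSION".toList
    else match recordB m with
      | none => none
      | some s => outerB rest (out_muts ++ [s])

def get_mutations_alt (mutations : String) : String :=
  match outerB (pvSplit mutations.toList [',']) [] with
  | some cs => String.ofList cs
  | none => ""

-- ===== PRECONDITION & SPEC =====
-- spec-side view of a token: (non-digit prefix, digit run, remainder)
def tokRuns (cs : List Char) : List Char × List Char × List Char :=
  (cs.takeWhile (fun c => !PySem.Chars.isdigit c),
   (cs.dropWhile (fun c => !PySem.Chars.isdigit c)).takeWhile PySem.Chars.isdigit,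
   (cs.dropWhile (fun c => !PySem.Chars.isdigit c)).dropWhile PySem.Chars.isdigit)

-- a token A's parser accepts: a parsable digit run, and nothing after it contains a digit
def validToken (cs : List Char) : Bool :=
  (PySem.Int.ofChars? (tokRuns cs).2.1).isSome &&
  (tokRuns cs).2.2.all (fun c => !PySem.Chars.isdigit c)

def tokTriple (cs : List Char) : List Char × Int × List Char :=
  ((tokRuns cs).1, (PySem.Int.ofChars? (tokRuns cs).2.1).getD 0, (tokRuns cs).2.2)

def gapStr (d : Int) : List Char :=
  if d = 0 then ['+'] else if d = 1 then ['+', 'X', '+']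
  else ['+'] ++ PySem.Int.toChars d ++ ['X', '+']

def specFmt (prev : Int) : List (List Char × Int × List Char) → List Char
  | [] => []
  | t :: ts => gapStr (t.2.1 - prev - 1) ++ t.1 ++ ['>'] ++ t.2.2 ++ specFmt t.2.1 ts

def specTriples (m : List Char) : List (List Char × Int × List Char) :=
  ((pvSplit m ['_']).drop 1).map (fun tok => tokTriple (pvFirst (pvSplit tok ['#'])))

-- the reduced form of one record, written out independently of either port
def specRed (m : List Char) : List Char :=
  match specTriples m with
  | [] => []
  | t :: ts => t.1 ++ ['>'] ++ t.2.2 ++ specFmt t.2.1 ts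

def recordOK (m : List Char) : Bool :=
  ((pvSplit m ['_']).drop 1).all (fun tok => validToken (pvFirst (pvSplit tok ['#'])))

def assertOK (outs : List (List Char)) : Bool :=
  outs.all (fun s => PySem.Chars.isIn s ((PySem.List.max? outs (fun t => t.length)).getD []))

-- Pre_ excludes exactly the inputs where Python A raises: a malformed token in a record before the
-- first FUSION record (IndexError/ValueError in get_ref_pos_alt_aa), or, with no FUSION record,
-- reduced strings that fail the closing assert (AssertionError).
def Pre_get_mutations (mutations : String) : Prop :=
  ((pvSplit mutations.toList [',']).takeWhile
      (fun r => !(PySem.Chars.isIn "FUSION".toList r))).all recordOK = true ∧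
  (((pvSplit mutations.toList [',']).takeWhile
      (fun r => !(PySem.Chars.isIn "FUSION".toList r))).length
        = (pvSplit mutations.toList [',']).length →
    assertOK (((pvSplit mutations.toList [',']).takeWhile
      (fun r => !(PySem.Chars.isIn "FUSION".toList r))).map specRed) = true)
instance (mutations : String) : Decidable (Pre_get_mutations mutations) := by
  unfold Pre_get_mutations; infer_instance

def pvWitness_get_mutations : String := "ENST1_S123K#0.56"

def Spec_get_mutations (mutations : String) (out : String) : Prop := out = get_mutations_alt mutations
instance (mutations : String) (out : String) : Decidable (Spec_get_mutations mutations out) := by unfold Spec_get_mutations; infer_instance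

-- ===== CLAIM (what is proved, stated in full; the proofs are below) =====
def Claim_equal_get_mutations : Prop := ∀ (mutations : String), Dom_get_mutations mutations → Pre_get_mutations mutations → Spec_get_mutations mutations (get_mutations mutations)

-- ===== LEMMAS AND PROOFS =====

theorem scanRef_eq (cs : List Char) :
    scanRef cs = (cs.takeWhile (fun c => !PySem.Chars.isdigit c),
                  cs.dropWhile (fun c => !PySem.Chars.isdigit c)) := by
  induction cs with
  | nil => rfl
  | cons c cs ih =>
    by_cases h : PySem.Chars.isdigit c <;>
      simp [scanRef, h, ih]

theorem scanPos_eq (cs : List Char) :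
    scanPos cs = (cs.takeWhile PySem.Chars.isdigit, cs.dropWhile PySem.Chars.isdigit) := by
  induction cs with
  | nil => rfl
  | cons c cs ih =>
    by_cases h : PySem.Chars.isdigit c <;>
      simp [scanPos, h, ih]

theorem parseB_eq_spec (cs : List Char) (h : validToken cs = true) :
    parseTok cs = some (tokTriple cs) := by
  have h' := h; unfold validToken at h'; rw [Bool.and_eq_true] at h'
  obtain ⟨n, hn⟩ := Option.isSome_iff_exists.mp h'.1
  have e1 : (scanRef cs).1 = (tokRuns cs).1 := by rw [scanRef_eq]; rfl
  have e2 : (scanPos (scanRef cs).2).1 = (tokRuns cs).2.1 := by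
    rw [scanRef_eq, scanPos_eq]; rfl
  have e3 : (scanPos (scanRef cs).2).2 = (tokRuns cs).2.2 := by
    rw [scanRef_eq, scanPos_eq]; rfl
  unfold parseTok tokTriple
  rw [e1, e2, e3, hn]
  simp

-- A's fold over a run of non-digits with the flag down appends to the current part
theorem foldA_nondigit (a : List Char) (h : ∀ c ∈ a, PySem.Chars.isdigit c = false)
    (p : List Char) (ps : List (List Char)) :
    a.foldl aaFoldStep (p :: ps, false) = ((p ++ a) :: ps, false) := by
  induction a generalizing p with
  | nil => simp
  | cons c a ih =>
    have hc := h c (by simp)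
    simp only [List.foldl_cons, aaFoldStep, hc]
    simpa using ih (fun x hx => h x (by simp [hx])) (p ++ [c])

-- A's fold over a run of digits with the flag up appends to the current part
theorem foldA_digit (d : List Char) (h : ∀ c ∈ d, PySem.Chars.isdigit c = true)
    (p : List Char) (ps : List (List Char)) :
    d.foldl aaFoldStep (p :: ps, true) = ((p ++ d) :: ps, true) := by
  induction d generalizing p with
  | nil => simp
  | cons c d ih =>
    have hc := h c (by simp)
    simp only [List.foldl_cons, aaFoldStep, hc]
    simpa using ih (fun x hx => h x (by simp [hx])) (p ++ [c])

theorem foldA_full (a d b : List Char)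
    (ha : ∀ c ∈ a, PySem.Chars.isdigit c = false)
    (hd : ∀ c ∈ d, PySem.Chars.isdigit c = true)
    (hb : ∀ c ∈ b, PySem.Chars.isdigit c = false)
    (hdne : d ≠ []) :
    get_ref_pos_alt_aa (a ++ (d ++ b))
      = (PySem.Int.ofChars? d).map (fun n => (a, n, b)) := by
  obtain ⟨c, d', rfl⟩ := List.exists_cons_of_ne_nil hdne
  have hc : PySem.Chars.isdigit c = true := hd c (by simp)
  have e1 : a.foldl aaFoldStep ([[]], false) = ([a], false) := by
    simpa using foldA_nondigit a ha [] []
  have e2 : aaFoldStep ([a], false) c = ([[c], a], true) := by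
    simp [aaFoldStep, hc]
  have e3 : d'.foldl aaFoldStep ([[c], a], true) = ([c :: d', a], true) := by
    simpa using foldA_digit d' (fun x hx => hd x (by simp [hx])) [c] [a]
  unfold get_ref_pos_alt_aa
  rw [List.foldl_append, e1, List.foldl_append, List.foldl_cons, e2, e3]
  cases b with
  | nil => rfl
  | cons c2 b' =>
    
    have hc2 : PySem.Chars.isdigit c2 = false := hb c2 (by simp)
    have e4 : aaFoldStep ([c :: d', a], true) c2 = ([[c2], c :: d', a], false) := by
      simp [aaFoldStep, hc2]
    have e5 : b'.foldl aaFoldStep ([[c2], c :: d', a], false)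
        = ([c2 :: b', c :: d', a], false) := by
      simpa using foldA_nondigit b' (fun x hx => hb x (by simp [hx])) [c2] [c :: d', a]
    rw [List.foldl_cons, e4, e5]
    rfl

theorem parseA_eq_spec (cs : List Char) (h : validToken cs = true) :
    get_ref_pos_alt_aa cs = some (tokTriple cs) := by
  have h' := h; unfold validToken at h'; rw [Bool.and_eq_true] at h'
  obtain ⟨hs, hb0⟩ := h'
  obtain ⟨n, hn⟩ := Option.isSome_iff_exists.mp hs
  have ha : ∀ c ∈ (tokRuns cs).1, PySem.Chars.isdigit c = false := by
    intro c hc; simpa using List.mem_takeWhile_imp hc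
  have hd : ∀ c ∈ (tokRuns cs).2.1, PySem.Chars.isdigit c = true := by
    intro c hc; exact List.mem_takeWhile_imp hc
  have hb : ∀ c ∈ (tokRuns cs).2.2, PySem.Chars.isdigit c = false := by
    intro c hc; simpa using List.all_eq_true.mp hb0 c hc
  have hdne : (tokRuns cs).2.1 ≠ [] := by
    intro he
    rw [he, show PySem.Int.ofChars? ([] : List Char) = none from by decide] at hn
    cases hn
  have hcs : cs = (tokRuns cs).1 ++ ((tokRuns cs).2.1 ++ (tokRuns cs).2.2) := by
    unfold tokRuns; simp
  calc get_ref_pos_alt_aa cs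
      = get_ref_pos_alt_aa ((tokRuns cs).1 ++ ((tokRuns cs).2.1 ++ (tokRuns cs).2.2)) := by
        rw [← hcs]
    _ = some (tokTriple cs) := by
        rw [foldA_full _ _ _ ha hd hb hdne, hn]; simp [tokTriple, hn]

theorem parseAllB_eq (tks : List (List Char))
    (h : ∀ tok ∈ tks, validToken (pvFirst (pvSplit tok ['#'])) = true) :
    parseAllB tks = some (tks.map (fun tok => tokTriple (pvFirst (pvSplit tok ['#'])))) := by
  induction tks with
  | nil => rfl
  | cons tok rest ih =>
    rw [parseAllB, parseB_eq_spec _ (h tok (by simp)),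
      ih (fun t ht => h t (by simp [ht]))]
    rfl

-- A's pieces after the first 'ref>alt'
def fmtTailA (prev : Int) : List (List Char × Int × List Char) → List (List Char)
  | [] => []
  | t :: ts => sepA prev t.2.1 :: (t.1 ++ ['>'] ++ t.2.2) :: fmtTailA t.2.1 ts

-- the pieces of one record: first 'ref>alt', then A's tail pieces
def piecesA (ts : List (List Char × Int × List Char)) : List (List Char) :=
  match ts with
  | [] => []
  | t :: ts => (t.1 ++ ['>'] ++ t.2.2) :: fmtTailA t.2.1 ts

theorem innerA_go (tks : List (List Char))
    (h : ∀ tok ∈ tks, validToken (pvFirst (pvSplit tok ['#'])) = true) :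
    ∀ (temp : List (List Char)) (p : Int), temp ≠ [] →
      innerA tks temp p
        = some (temp ++ fmtTailA p (tks.map (fun tok => tokTriple (pvFirst (pvSplit tok ['#']))))) := by
  induction tks with
  | nil => intro temp p _; simp [innerA, fmtTailA]
  | cons tok rest ih =>
    intro temp p htemp
    have hE : temp.isEmpty = false := by
      cases temp with
      | nil => exact absurd rfl htemp
      | cons a t => rfl
    rw [innerA, parseA_eq_spec _ (h tok (by simp))]
    have hne : (temp ++ [sepA p (tokTriple (pvFirst (pvSplit tok ['#']))).2.1]
        ++ [(tokTriple (pvFirst (pvSplit tok ['#']))).1 ++ ['>']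
            ++ (tokTriple (pvFirst (pvSplit tok ['#']))).2.2]) ≠ [] := by simp
    simp only [hE, Bool.false_eq_true, if_false]
    rw [ih (fun t ht => h t (by simp [ht])) _ _ hne]
    simp [fmtTailA, List.append_assoc]

theorem innerA_top (tks : List (List Char))
    (h : ∀ tok ∈ tks, validToken (pvFirst (pvSplit tok ['#'])) = true) :
    innerA tks [] 0
      = some (piecesA (tks.map (fun tok => tokTriple (pvFirst (pvSplit tok ['#']))))) := by
  cases tks with
  | nil => rfl
  | cons tok rest =>
    rw [innerA, parseA_eq_spec _ (h tok (by simp))]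
    have hne : (([] : List (List Char))
        ++ [(tokTriple (pvFirst (pvSplit tok ['#']))).1 ++ ['>']
            ++ (tokTriple (pvFirst (pvSplit tok ['#']))).2.2]) ≠ [] := by simp
    simp only [List.isEmpty_nil, if_true]
    rw [innerA_go rest (fun t ht => h t (by simp [ht])) _ _ hne]
    simp [piecesA]

theorem sepA_eq_gap (p q : Int) : sepA p q = gapStr (q - p - 1) := by
  unfold sepA gapStr
  by_cases h0 : q - p - 1 = 0 <;> by_cases h1 : q - p - 1 = 1 <;> simp [h0, h1]

theorem joinA_tail (ts : List (List Char × Int × List Char)) :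
    ∀ (p : Int) (x : List Char),
      PySem.Chars.join [] (x :: fmtTailA p ts) = x ++ specFmt p ts := by
  induction ts with
  | nil => intro p x; simp [fmtTailA, specFmt, PySem.Chars.join_singleton]
  | cons t ts ih =>
    intro p x
    rw [fmtTailA, PySem.Chars.join_cons_cons, PySem.Chars.join_cons_cons, ih, specFmt,
      sepA_eq_gap]
    simp

-- B's items after the first 'ref>alt'
def itemsTailB (prev : Int) : List (List Char × Int × List Char) → List (List Char)
  | [] => []
  | t :: ts =>
    (if t.2.1 - prev - 1 = 1 then [['X']]
     else if t.2.1 - prev - 1 ≠ 0 then [PySem.Int.toChars (t.2.1 - prev - 1) ++ ['X']]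
     else []) ++ (t.1 ++ ['>'] ++ t.2.2) :: itemsTailB t.2.1 ts

def lastPosB (p : Int) : List (List Char × Int × List Char) → Int
  | [] => p
  | t :: ts => lastPosB t.2.1 ts

theorem foldB_go (ts : List (List Char × Int × List Char)) :
    ∀ (acc : List (List Char)) (p : Int),
      ts.foldl stepB (acc, some p) = (acc ++ itemsTailB p ts, some (lastPosB p ts)) := by
  induction ts with
  | nil => intro acc p; simp [itemsTailB, lastPosB]
  | cons t ts ih =>
    intro acc p
    rw [List.foldl_cons]
    have hstep : stepB (acc, some p) t
        = (acc ++ ((if t.2.1 - p - 1 = 1 then [['X']]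
            else if t.2.1 - p - 1 ≠ 0 then [PySem.Int.toChars (t.2.1 - p - 1) ++ ['X']]
            else []) ++ [t.1 ++ ['>'] ++ t.2.2]), some t.2.1) := by
      unfold stepB
      by_cases h1 : t.2.1 - p - 1 = 1 <;> by_cases h0 : t.2.1 - p - 1 = 0 <;>
        first | omega | simp [h1, h0]
    rw [hstep, ih, itemsTailB, lastPosB]
    simp [List.append_assoc]

theorem joinB_tail (ts : List (List Char × Int × List Char)) :
    ∀ (p : Int) (x : List Char),
      PySem.Chars.join ['+'] (x :: itemsTailB p ts) = x ++ specFmt p ts := by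
  induction ts with
  | nil => intro p x; simp [itemsTailB, specFmt, PySem.Chars.join_singleton]
  | cons t ts ih =>
    intro p x
    rw [itemsTailB, specFmt]
    by_cases h1 : t.2.1 - p - 1 = 1
    · rw [if_pos h1]
      rw [show (([['X']] : List (List Char)) ++ _) = ['X'] :: (t.1 ++ ['>'] ++ t.2.2) :: itemsTailB t.2.1 ts from rfl]
      rw [PySem.Chars.join_cons_cons, PySem.Chars.join_cons_cons, ih, gapStr, h1]
      simp
    · by_cases h0 : t.2.1 - p - 1 = 0
      · rw [if_neg h1, if_neg (by simp [h0])]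
        rw [List.nil_append, PySem.Chars.join_cons_cons, ih, gapStr, h0]
        simp
      · rw [if_neg h1, if_pos h0]
        rw [show ((([PySem.Int.toChars (t.2.1 - p - 1) ++ ['X']] : List (List Char)) ++ _))
            = (PySem.Int.toChars (t.2.1 - p - 1) ++ ['X']) :: (t.1 ++ ['>'] ++ t.2.2) :: itemsTailB t.2.1 ts from rfl]
        rw [PySem.Chars.join_cons_cons, PySem.Chars.join_cons_cons, ih, gapStr,
          if_neg h0, if_neg h1]
        simp

theorem joinA_red (m : List Char) :
    PySem.Chars.join []
        (piecesA (((pvSplit m ['_']).drop 1).map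
          (fun tok => tokTriple (pvFirst (pvSplit tok ['#']))))) = specRed m := by
  show PySem.Chars.join [] (piecesA (specTriples m)) = specRed m
  unfold specRed
  cases specTriples m with
  | nil => rfl
  | cons t ts =>
    show PySem.Chars.join [] ((t.1 ++ ['>'] ++ t.2.2) :: fmtTailA t.2.1 ts) = _
    rw [joinA_tail]


theorem recordB_eq (m : List Char) (h : recordOK m = true) :
    recordB m = some (specRed m) := by
  unfold recordOK at h
  have hv := List.all_eq_true.mp h
  unfold recordB
  rw [parseAllB_eq _ hv]
  unfold specRed
  cases hts : specTriples m with
  | nil =>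
    rw [show ((pvSplit m ['_']).drop 1).map
        (fun tok => tokTriple (pvFirst (pvSplit tok ['#']))) = [] from hts]
    rfl
  | cons t ts =>
    rw [show ((pvSplit m ['_']).drop 1).map
        (fun tok => tokTriple (pvFirst (pvSplit tok ['#']))) = t :: ts from hts]
    have hfirst : stepB ([], none) t = ([t.1 ++ ['>'] ++ t.2.2], some t.2.1) := rfl
    rw [Option.map_some]
    rw [List.foldl_cons, hfirst, foldB_go]
    rw [show (([t.1 ++ ['>'] ++ t.2.2] ++ itemsTailB t.2.1 ts, some (lastPosB t.2.1 ts)).1)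
        = (t.1 ++ ['>'] ++ t.2.2) :: itemsTailB t.2.1 ts from rfl]
    rw [joinB_tail]

theorem all_eq_of_set_short (o : List Char) (rest : List (List Char))
    (h : (PySem.Set.ofList (o :: rest)).length ≤ 1) : ∀ y ∈ o :: rest, y = o := by
  intro y hy
  have hyS : y ∈ PySem.Set.ofList (o :: rest) :=
    (PySem.Set.mem_ofList (o :: rest) y).mpr hy
  have hoS : o ∈ PySem.Set.ofList (o :: rest) :=
    (PySem.Set.mem_ofList (o :: rest) o).mpr (by simp)
  cases hS : PySem.Set.ofList (o :: rest) with
  | nil => rw [hS] at hoS; cases hoS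
  | cons x t =>
    rw [hS] at hyS hoS h
    have ht : t = [] := by
      cases t with
      | nil => rfl
      | cons z zs => simp at h
    subst ht
    rw [List.mem_singleton] at hyS hoS
    rw [hyS, hoS]

theorem max?_of_all_eq (o : List Char) (rest : List (List Char))
    (h : ∀ y ∈ rest, y = o) :
    PySem.List.max? (o :: rest) (fun s => s.length) = some o := by
  cases hm : PySem.List.max? (o :: rest) (fun s => s.length) with
  | none => exact absurd ((PySem.List.max?_eq_none_iff _ _).mp hm) (by simp)
  | some m =>
    have hmem := PySem.List.max?_mem hm
    rcases List.mem_cons.mp hmem with rfl | hmr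
    · rfl
    · rw [h m hmr]

theorem finish_eq (outs : List (List Char)) (h : assertOK outs = true) :
    collapseA outs = finishB outs := by
  unfold assertOK at h
  cases outs with
  | nil => rfl
  | cons o rest =>
    by_cases hset : 1 < (PySem.Set.ofList (o :: rest)).length
    · unfold collapseA finishB
      rw [if_pos hset]
    · have hall := all_eq_of_set_short o rest (by omega)
      have hmax := max?_of_all_eq o rest (fun y hy => hall y (by simp [hy]))
      have h' : ((o :: rest).all fun s => PySem.Chars.isIn s o) = true := by
        simpa only [hmax, Option.getD_some] using h
      unfold collapseA finishB
      rw [if_neg hset]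
      show some ((o :: rest).headD []) =
        (if ((o :: rest).all fun s =>
              PySem.Chars.isIn s ((PySem.List.max? (o :: rest) fun s => s.length).getD []))
            = true
         then some ((PySem.List.max? (o :: rest) fun s => s.length).getD []) else none)
      rw [hmax]
      simp only [Option.getD_some]
      rw [if_pos h']
      rfl

theorem outer_eq (recs : List (List Char)) :
    ∀ acc, (recs.takeWhile (fun r => !(PySem.Chars.isIn "FUSION".toList r))).all recordOK = true →
      ((recs.takeWhile (fun r => !(PySem.Chars.isIn "FUSION".toList r))).length = recs.length →
        assertOK (acc ++ (recs.takeWhile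
          (fun r => !(PySem.Chars.isIn "FUSION".toList r))).map specRed) = true) →
      outerA recs acc = outerB recs acc := by
  induction recs with
  | nil =>
    intro acc _ h2
    exact finish_eq acc (by simpa using h2 rfl)
  | cons r rest ih =>
    intro acc h1 h2
    by_cases hf : PySem.Chars.isIn "FUSION".toList r = true
    · simp only [outerA, outerB]
      rw [if_pos hf, if_pos hf]
    · have hf' : PySem.Chars.isIn "FUSION".toList r = false :=
        Bool.eq_false_iff.mpr hf
      have hp : (fun r => !PySem.Chars.isIn "FUSION".toList r) r = true := by
        show (!PySem.Chars.isIn "FUSION".toList r) = true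
        rw [hf']; rfl
      rw [List.takeWhile_cons_of_pos
        (p := fun r => !PySem.Chars.isIn "FUSION".toList r) hp] at h1 h2
      rw [List.all_cons, Bool.and_eq_true] at h1
      simp only [outerA, outerB, hf', Bool.false_eq_true, if_false,
        innerA_top _ (List.all_eq_true.mp h1.1), recordB_eq r h1.1, joinA_red]
      refine ih _ h1.2 (fun hl => ?_)
      have h2' := h2 (by simpa using hl)
      simpa using h2'

-- ===== VERDICT (by name: the statement is the Claim_ definition above) =====
theorem get_mutations_spec : Claim_equal_get_mutations := by
  intro mutations _ hpre
  unfold Spec_get_mutations get_mutations get_mutations_alt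
  rw [outer_eq _ _ hpre.1 (by simpa using hpre.2)]
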